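-- pv_equiv track=rewrite | github.com/crashtack/401prework | codingbat/string2.py | xyz_there
-- ===== SOURCE A (Python) =====
-- def xyz_there(str):
--     index = 0
--     while index < len(str):
--         if str.find('xyz', index) >= 0 and str[str.find('xyz',index) - 1] != '.':
--             return True
--         else:
--             index += 3
--     return False
-- ===== SOURCE B (Python) =====
-- def xyz_there(str):
--     for i in range(len(str) - 2):
--         if str[i:i+3] == 'xyz' and (i == 0 or str[i-1] != '.'):
--             return True
--     return False
-- ===== Notes on version B (the rewrite author's own statement) =====
-- stated objective: faster
-- what changed: B replaces A's find-from-every-third-index loop (which rescans the string with str.find on each iteration and wrongly reads str[-1] for a match at position 0) by a single left-to-right scan comparing str[i:i+3] with a direct i==0 check for the start of the string.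
-- intended difference: On strings that start with 'xyz', end with '.', and whose every other 'xyz' occurrence is preceded by '.', A returns False because str[find-1] wraps to str[-1] for the match at index 0, while B returns True, the intended answer since an 'xyz' at the start of the string is not preceded by anything. — e.g. on xyz_there("xyz."): A returns false, B returns true
import Mathlib
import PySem

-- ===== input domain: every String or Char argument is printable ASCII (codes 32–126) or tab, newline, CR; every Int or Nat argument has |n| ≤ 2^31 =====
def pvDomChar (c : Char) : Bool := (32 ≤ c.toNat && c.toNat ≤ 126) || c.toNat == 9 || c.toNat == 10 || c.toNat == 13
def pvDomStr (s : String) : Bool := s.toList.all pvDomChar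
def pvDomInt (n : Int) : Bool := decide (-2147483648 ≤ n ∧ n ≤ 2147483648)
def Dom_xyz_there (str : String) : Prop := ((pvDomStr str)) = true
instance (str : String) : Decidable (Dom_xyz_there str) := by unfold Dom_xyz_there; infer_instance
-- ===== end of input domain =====

-- B replaces A's find-from-every-third-index loop by a single O(n) left-to-right scan;
-- A's str[-1] wraparound for a match at index 0 is stated as an intended difference (D_ below).

-- ===== PORT A =====
-- the while loop: index steps by 3; fuel = remaining length bound (the loop runs at most len times)
def xyzGo (s : List Char) (fuel : Nat) (index : Nat) : Bool :=
  match fuel with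
  | 0 => false
  | Nat.succ fuel =>
    if (index : Int) < PySem.Chars.len s then
      -- str.find('xyz', index) ≥ 0 and str[str.find('xyz', index) - 1] != '.'
      let f := PySem.Chars.findFrom s "xyz".toList (index : Int)
      if 0 ≤ f ∧ PySem.List.pyGetD s (f - 1) '.' ≠ '.' then true
      else xyzGo s fuel (index + 3)
    else false

def xyz_there (str : String) : Bool := xyzGo str.toList str.toList.length 0

-- ===== PORT B =====
-- for i in range(len(str)-2): if str[i:i+3] == 'xyz' and (i == 0 or str[i-1] != '.'): return True
def xyz_there_alt (str : String) : Bool :=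
  (PySem.List.pyRange 0 (PySem.Chars.len str.toList - 2)).any fun i =>
    decide (PySem.List.slice str.toList (some i) (some (i + 3)) = "xyz".toList) &&
    (decide (i = 0) || decide (PySem.List.pyGetD str.toList (i - 1) ' ' ≠ '.'))

-- ===== PRECONDITION & SPEC =====
-- On strings that start with 'xyz', end with '.', and whose every other 'xyz' occurrence is
-- preceded by '.', A returns False (str[find-1] wraps to str[-1] for the match at index 0)
-- while B returns True, the intended answer: 'xyz' at the start is not preceded by anything.
def D_xyz_there (str : String) : Prop :=
  "xyz".toList <+: str.toList ∧ str.toList.getLast? = some '.' ∧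
  ∀ p : Nat, p < str.toList.length → 0 < p → "xyz".toList <+: str.toList.drop p →
    str.toList[p-1]? = some '.'
instance (str : String) : Decidable (D_xyz_there str) := by unfold D_xyz_there; infer_instance

def Spec_xyz_there (str : String) (out : Bool) : Prop := ¬ D_xyz_there str → out = xyz_there_alt str
instance (str : String) (out : Bool) : Decidable (Spec_xyz_there str out) := by unfold Spec_xyz_there; infer_instance

def pvDiffWitness_xyz_there : String := "xyz."
def pvDiffWitnessOut_xyz_there : Bool × Bool := (false, true)

-- ===== CLAIM (what is proved, stated in full; the proofs are below) =====
def Claim_unchanged_xyz_there : Prop := ∀ (str : String), Dom_xyz_there str → Spec_xyz_there str (xyz_there str)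
def Claim_changed_xyz_there : Prop := Dom_xyz_there (pvDiffWitness_xyz_there) ∧ D_xyz_there (pvDiffWitness_xyz_there) ∧ xyz_there (pvDiffWitness_xyz_there) = pvDiffWitnessOut_xyz_there.1 ∧ xyz_there_alt (pvDiffWitness_xyz_there) = pvDiffWitnessOut_xyz_there.2 ∧ pvDiffWitnessOut_xyz_there.1 ≠ pvDiffWitnessOut_xyz_there.2
def Claim_exact_xyz_there : Prop := ∀ (str : String), Dom_xyz_there str → D_xyz_there str → xyz_there str ≠ xyz_there_alt str

-- ===== LEMMAS AND PROOFS =====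

-- an 'xyz' occurrence forces length ≥ p + 3
theorem occ_len {s : List Char} {p : Nat} (h : "xyz".toList <+: s.drop p) :
    p + 3 ≤ s.length := by
  have := h.length_le
  simp at this
  omega

-- two distinct 'xyz' occurrences are at least 3 apart
theorem occ_gap {s : List Char} {q p : Nat}
    (hq : "xyz".toList <+: s.drop q) (hp : "xyz".toList <+: s.drop p) (hlt : q < p) :
    q + 3 ≤ p := by
  obtain ⟨t, ht⟩ := hq
  obtain ⟨u, hu⟩ := hp
  have h1 : s[q+1]? = some 'y' := by
    have := List.getElem?_drop (xs := s) (i := q) (j := 1)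
    rw [← ht] at this; simpa using this.symm
  have h2 : s[q+2]? = some 'z' := by
    have := List.getElem?_drop (xs := s) (i := q) (j := 2)
    rw [← ht] at this; simpa using this.symm
  have h3 : s[p]? = some 'x' := by
    have := List.getElem?_drop (xs := s) (i := p) (j := 0)
    rw [← hu] at this; simpa using this.symm
  by_contra hcon
  have hc : p = q+1 ∨ p = q+2 := by omega
  rcases hc with h|h <;> subst h <;> simp_all

-- occurrence at p ≥ k gives an infix of drop k
theorem occ_infix {s : List Char} {k p : Nat} (hkp : k ≤ p)
    (h : "xyz".toList <+: s.drop p) : "xyz".toList <:+: s.drop k := by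
  have hdd : s.drop p = (s.drop k).drop (p - k) := by
    rw [List.drop_drop]; congr 1; omega
  have hsuf : s.drop p <:+ s.drop k := by rw [hdd]; exact List.drop_suffix _ _
  exact h.isInfix.trans hsuf.isInfix

-- characterization of A's loop
theorem go_iff (s : List Char) : ∀ (fuel index : Nat), s.length ≤ fuel + index →
    (xyzGo s fuel index = true ↔
      ∃ p : Nat, index ≤ p ∧ "xyz".toList <+: s.drop p ∧
        PySem.List.pyGetD s ((p : Int) - 1) '.' ≠ '.') := by
  intro fuel
  induction fuel with
  | zero =>
    intro index hlen
    simp only [xyzGo, Bool.false_eq_true, false_iff]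
    rintro ⟨p, hip, hocc, -⟩
    have := occ_len hocc
    omega
  | succ fuel ih =>
    intro index hlen
    by_cases hidx : (index : Int) < PySem.Chars.len s
    · have hidx' : index < s.length := by
        rw [PySem.Chars.len_eq] at hidx; exact_mod_cast hidx
      rw [show xyzGo s (fuel + 1) index =
          (if 0 ≤ PySem.Chars.findFrom s "xyz".toList (index : Int) ∧
              PySem.List.pyGetD s (PySem.Chars.findFrom s "xyz".toList (index : Int) - 1) '.' ≠ '.'
           then true else xyzGo s fuel (index + 3)) from by
        simp only [xyzGo]; rw [if_pos hidx]]
      set F := PySem.Chars.findFrom s "xyz".toList (index : Int) with hF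
      by_cases hc : 0 ≤ F ∧ PySem.List.pyGetD s (F - 1) '.' ≠ '.'
      · rw [if_pos hc]
        obtain ⟨hF0, hFc⟩ := hc
        have hFne : F ≠ -1 := by omega
        obtain ⟨hkF, hpre, -⟩ :=
          PySem.Chars.findFrom_natCast_spec s "xyz".toList index (le_of_lt hidx') hFne
        simp only [true_iff]
        refine ⟨F.toNat, by omega, hpre, ?_⟩
        rwa [show ((F.toNat : Int) - 1) = F - 1 by omega]
      · rw [if_neg hc]
        rw [ih (index + 3) (by omega)]
        by_cases hf : F = -1
        · have hno : ¬ "xyz".toList <:+: s.drop index :=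
            (PySem.Chars.findFrom_natCast_eq_neg_one_iff s "xyz".toList index
              (le_of_lt hidx')).mp hf
          constructor
          · rintro ⟨p, hip, hocc, -⟩
            exact absurd (occ_infix (by omega) hocc) hno
          · rintro ⟨p, hip, hocc, -⟩
            exact absurd (occ_infix (by omega) hocc) hno
        · obtain ⟨hkF, hpre, hmin⟩ :=
            PySem.Chars.findFrom_natCast_spec s "xyz".toList index (le_of_lt hidx') hf
          have hF0 : 0 ≤ F := by omega
          have hFc : PySem.List.pyGetD s (F - 1) '.' = '.' := by
            by_contra h
            exact hc ⟨hF0, h⟩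
          constructor
          · rintro ⟨p, hip, hocc, hcond⟩
            exact ⟨p, by omega, hocc, hcond⟩
          · rintro ⟨p, hip, hocc, hcond⟩
            refine ⟨p, ?_, hocc, hcond⟩
            rcases lt_trichotomy p F.toNat with hlt | heq | hgt
            · exact absurd hocc (hmin p hip hlt)
            · exfalso
              apply hcond
              rw [show ((p : Int) - 1) = F - 1 by omega]
              exact hFc
            · have := occ_gap hpre hocc hgt
              omega
    · have hidx' : s.length ≤ index := by
        rw [PySem.Chars.len_eq] at hidx; omega
      rw [show xyzGo s (fuel + 1) index = false from by
        simp only [xyzGo]; rw [if_neg hidx]]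
      simp only [Bool.false_eq_true, false_iff]
      rintro ⟨p, hip, hocc, -⟩
      have := occ_len hocc
      omega

-- str[i:i+3] == 'xyz' names an occurrence
theorem slice_eq_iff (s : List Char) (p : Nat) :
    (PySem.List.slice s (some (p : Int)) (some ((p : Int) + 3)) = "xyz".toList) ↔
      "xyz".toList <+: s.drop p := by
  rw [show ((p : Int) + 3) = ((p + 3 : Nat) : Int) by push_cast; ring]
  rw [PySem.List.slice_natCast]
  rw [List.prefix_iff_eq_take]
  rw [show "xyz".toList.length = 3 from rfl]
  rw [show p + 3 - p = 3 by omega]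
  exact eq_comm

-- str[p-1] != '.' read through pyGetD, for p ≥ 1 in range (default irrelevant)
theorem pred_dot_iff (s : List Char) (p : Nat) (hp : 0 < p) (hlt : p - 1 < s.length) (d : Char) :
    (PySem.List.pyGetD s ((p : Int) - 1) d = '.') ↔ s[p-1]? = some '.' := by
  rw [show ((p : Int) - 1) = ((p - 1 : Nat) : Int) by omega, PySem.List.pyGetD_natCast,
      List.getD_eq_getElem?_getD, List.getElem?_eq_getElem hlt]
  simp

-- str[-1] read through pyGetD (default irrelevant)
theorem last_dot_iff (s : List Char) (h : s ≠ []) (d : Char) :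
    (PySem.List.pyGetD s (-1) d = '.') ↔ s.getLast? = some '.' := by
  rw [PySem.List.pyGetD_neg_one s d h, List.getLast?_eq_some_getLast h]
  simp

-- characterization of B
theorem alt_iff (str : String) :
    xyz_there_alt str = true ↔
      ∃ p : Nat, "xyz".toList <+: str.toList.drop p ∧
        (p = 0 ∨ PySem.List.pyGetD str.toList ((p : Int) - 1) ' ' ≠ '.') := by
  unfold xyz_there_alt
  rw [List.any_eq_true]
  constructor
  · rintro ⟨i, hmem, hpred⟩
    rw [PySem.List.mem_pyRange_one] at hmem
    obtain ⟨p, rfl⟩ : ∃ p : Nat, i = (p : Int) := ⟨i.toNat, by omega⟩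
    simp only [Bool.and_eq_true, Bool.or_eq_true, decide_eq_true_eq] at hpred
    obtain ⟨hsl, hcond⟩ := hpred
    refine ⟨p, (slice_eq_iff _ p).mp hsl, ?_⟩
    rcases hcond with h | h
    · left; exact_mod_cast h
    · right; exact h
  · rintro ⟨p, hocc, hcond⟩
    have hl := occ_len hocc
    refine ⟨(p : Int), ?_, ?_⟩
    · rw [PySem.List.mem_pyRange_one, PySem.Chars.len_eq]
      constructor <;> [omega; (push_cast; omega)]
    · simp only [Bool.and_eq_true, Bool.or_eq_true, decide_eq_true_eq]
      refine ⟨(slice_eq_iff _ p).mpr hocc, ?_⟩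
      rcases hcond with h | h
      · left; exact_mod_cast h
      · right; exact h

-- characterization of A
theorem a_iff (str : String) :
    xyz_there str = true ↔
      ∃ p : Nat, "xyz".toList <+: str.toList.drop p ∧
        PySem.List.pyGetD str.toList ((p : Int) - 1) '.' ≠ '.' := by
  unfold xyz_there
  rw [go_iff str.toList str.toList.length 0 (by omega)]
  simp only [Nat.zero_le, true_and]

-- ===== VERDICT (by name: the statement is the Claim_ definition above) =====
theorem xyz_there_spec : Claim_unchanged_xyz_there := by
  intro str _ hD
  unfold D_xyz_there at hD
  rw [show (xyz_there str = xyz_there_alt str) ↔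
      (xyz_there str = true ↔ xyz_there_alt str = true) from Bool.eq_iff_iff]
  rw [a_iff, alt_iff]
  constructor
  · rintro ⟨p, hocc, hcond⟩
    rcases Nat.eq_zero_or_pos p with rfl | hp
    · exact ⟨0, hocc, Or.inl rfl⟩
    · have hl := occ_len hocc
      refine ⟨p, hocc, Or.inr ?_⟩
      intro h
      exact hcond ((pred_dot_iff _ p hp (by omega) '.').mpr
        ((pred_dot_iff _ p hp (by omega) ' ').mp h))
  · rintro ⟨p, hocc, hcond⟩
    rcases hcond with rfl | h
    · -- p = 0 : use ¬ D
      have hl := occ_len hocc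
      have hne : str.toList ≠ [] := by
        intro h; rw [h] at hl; simp at hl
      rcases not_and_or.mp (fun h => hD ⟨by simpa using hocc, h.1, h.2⟩) with h1 | h2
      · refine ⟨0, hocc, ?_⟩
        intro h
        exact h1 ((last_dot_iff _ hne '.').mp (by simpa using h))
      · rcases not_forall.mp h2 with ⟨q, hq⟩
        rcases Classical.not_imp.mp hq with ⟨hqlen, hq⟩
        rcases Classical.not_imp.mp hq with ⟨hq0, hq⟩
        rcases Classical.not_imp.mp hq with ⟨hqocc, hqdot⟩
        refine ⟨q, hqocc, ?_⟩
        intro h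
        exact hqdot ((pred_dot_iff _ q hq0 (by omega) '.').mp h)
    · rcases Nat.eq_zero_or_pos p with rfl | hp
      · -- B's right disjunct at p = 0 reads str[-1] too
        have hl := occ_len hocc
        have hne : str.toList ≠ [] := by
          intro hh; rw [hh] at hl; simp at hl
        refine ⟨0, hocc, ?_⟩
        intro hh
        apply h
        have := (last_dot_iff str.toList hne '.').mp (by simpa using hh)
        simpa using (last_dot_iff str.toList hne ' ').mpr this
      · have hl := occ_len hocc
        refine ⟨p, hocc, ?_⟩
        intro hh
        exact h ((pred_dot_iff _ p hp (by omega) ' ').mpr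
          ((pred_dot_iff _ p hp (by omega) '.').mp hh))

theorem xyz_there_changed : Claim_changed_xyz_there := by
  unfold Claim_changed_xyz_there; decide

theorem xyz_there_tight : Claim_exact_xyz_there := by
  intro str _ hD
  obtain ⟨h0, hlast, hall⟩ := hD
  have hB : xyz_there_alt str = true :=
    (alt_iff str).mpr ⟨0, by simpa using h0, Or.inl rfl⟩
  have hA : xyz_there str ≠ true := by
    rw [Ne, a_iff]
    rintro ⟨p, hocc, hcond⟩
    have hl := occ_len hocc
    rcases Nat.eq_zero_or_pos p with rfl | hp
    · have hne : str.toList ≠ [] := by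
        intro h; rw [h] at hl; simp at hl
      exact hcond (by simpa using (last_dot_iff _ hne '.').mpr hlast)
    · exact hcond ((pred_dot_iff _ p hp (by omega) '.').mpr
        (hall p (by omega) hp hocc))
  rw [hB]
  exact hA
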